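-- pv_equiv track=rewrite | github.com/renzofbn/hang-py | Data/utilities.py | map_word
-- ===== SOURCE A (Python) =====
-- def map_word(word):
--     dicc = {}
--     cont = 0
--     for caracter in word:
--         if caracter in dicc:
--             dicc[caracter] += [cont]
--         else:
--             dicc[caracter] = [cont]
--         cont += 1
--     return dicc
-- ===== SOURCE B (Python) =====
-- def map_word(word):
--     def positions(c):
--         return [i for i, ch in enumerate(word) if ch == c]
--     return {c: positions(c) for c in dict.fromkeys(word)}
-- ===== Notes on version B (the rewrite author's own statement) =====
-- stated objective: alternative
-- what changed: Instead of one accumulating pass that grows per-key lists in a dict, B first takes the distinct characters (in first-occurrence order) and builds each character's index list by its own enumerate scan of the word.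
import Mathlib
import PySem

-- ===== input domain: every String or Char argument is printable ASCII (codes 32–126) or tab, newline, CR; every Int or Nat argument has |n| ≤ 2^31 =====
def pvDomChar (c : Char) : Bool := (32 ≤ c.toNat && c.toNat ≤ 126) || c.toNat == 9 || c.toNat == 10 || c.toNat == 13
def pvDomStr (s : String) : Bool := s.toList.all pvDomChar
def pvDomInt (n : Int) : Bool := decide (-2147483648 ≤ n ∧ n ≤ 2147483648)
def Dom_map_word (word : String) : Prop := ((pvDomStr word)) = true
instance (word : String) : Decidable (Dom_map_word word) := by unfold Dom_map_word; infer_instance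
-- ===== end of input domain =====

-- B replaces A's single accumulating dict pass by a per-distinct-character scan of the word (alternative decomposition, same results).

-- one Python character as the string it is in Python
def pvKey (c : Char) : String := String.ofList [c]

-- ===== PORT A =====
-- the loop body of A: 'if caracter in dicc: dicc[caracter] += [cont] else: dicc[caracter] = [cont]; cont += 1'
def pvStepA (st : PySem.Dict String (List Int) × Int) (caracter : Char) :
    PySem.Dict String (List Int) × Int :=
  let key := pvKey caracter
  if st.1.contains key then (st.1.insert key (st.1.getD key [] ++ [st.2]), st.2 + 1)
  else (st.1.insert key [st.2], st.2 + 1)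

def map_word (word : String) : List (String × List Int) :=
  ((word.toList.foldl pvStepA (PySem.Dict.empty, 0)).1).items

-- ===== PORT B =====
-- '[i for i, ch in enumerate(word) if ch == c]'
def pvPositions (cs : List Char) (c : Char) : List Int :=
  ((PySem.List.enumerate cs 0).filter (fun p => p.2 == c)).map (fun p => p.1)

-- '{c: positions(c) for c in dict.fromkeys(word)}'
def map_word_alt (word : String) : List (String × List Int) :=
  (PySem.List.dedup word.toList).map (fun c => (pvKey c, pvPositions word.toList c))

-- ===== PRECONDITION & SPEC =====
def Spec_map_word (word : String) (out : List (String × List Int)) : Prop := out = map_word_alt word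
instance (word : String) (out : List (String × List Int)) : Decidable (Spec_map_word word out) := by unfold Spec_map_word; infer_instance

-- ===== CLAIM (what is proved, stated in full; the proofs are below) =====
def Claim_equal_map_word : Prop := ∀ (word : String), Dom_map_word word → Spec_map_word word (map_word word)

-- ===== LEMMAS AND PROOFS =====

theorem pvKey_inj : Function.Injective pvKey := by
  intro a b h
  have h2 := congrArg String.toList h
  simpa [pvKey] using h2

theorem pvKey_beq (a b : Char) : (pvKey a == pvKey b) = (a == b) := by
  by_cases h : a = b
  · subst h; simp
  · rw [beq_eq_false_iff_ne.2 h, beq_eq_false_iff_ne.2 (fun he => h (pvKey_inj he))]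

theorem pvPositions_append (cs : List Char) (a c : Char) :
    pvPositions (cs ++ [a]) c
      = pvPositions cs c ++ (if c = a then [(cs.length : Int)] else []) := by
  unfold pvPositions
  rw [PySem.List.enumerate_append, List.filter_append, List.map_append,
    PySem.List.enumerate_cons, PySem.List.enumerate_nil]
  congr 1
  by_cases h : c = a
  · subst h
    simp
  · rw [List.filter_cons_of_neg (by simpa using fun he => h he.symm)]
    simp [h]

theorem pvPositions_nil_of_not_mem {cs : List Char} {a : Char} (h : a ∉ cs) :
    pvPositions cs a = [] := by
  unfold pvPositions
  rw [List.filter_eq_nil_iff.2, List.map_nil]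
  intro p hp
  rcases (PySem.List.mem_enumerate_iff _ _ _).1 hp with ⟨k, hk, rfl⟩
  simp only [beq_iff_eq]
  intro hpe
  exact h (hpe ▸ List.getElem_mem hk)

-- the dict A has built after processing the prefix cs, written as its items list
def pvDictOf (cs : List Char) : PySem.Dict String (List Int) :=
  ⟨(PySem.List.dedup cs).map (fun c => (pvKey c, pvPositions cs c))⟩

theorem pvDict_eq_of_items {d e : PySem.Dict String (List Int)} (h : d.items = e.items) :
    d = e := by
  cases d; cases e; cases h; rfl

theorem pvNodup_dedup (cs : List Char) : (PySem.List.dedup cs).Nodup := by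
  rw [PySem.List.dedup_eq_ofList]; exact PySem.Set.nodup_ofList cs

theorem pvKeys_dictOf (cs : List Char) :
    (pvDictOf cs).keys = (PySem.List.dedup cs).map pvKey := by
  simp [pvDictOf, PySem.Dict.keys, List.map_map, Function.comp]

theorem pvKeys_dictOf_nodup (cs : List Char) : (pvDictOf cs).keys.Nodup := by
  rw [pvKeys_dictOf]
  exact List.Nodup.map pvKey_inj (pvNodup_dedup cs)

theorem pvContains_dictOf (cs : List Char) (a : Char) :
    (pvDictOf cs).contains (pvKey a) = true ↔ a ∈ PySem.List.dedup cs := by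
  rw [PySem.Dict.contains_iff_mem_keys, pvKeys_dictOf, List.mem_map]
  constructor
  · rintro ⟨c, hc, he⟩; exact (pvKey_inj he) ▸ hc
  · intro h; exact ⟨a, h, rfl⟩

theorem pvGetD_dictOf (cs : List Char) (a : Char) (ha : a ∈ PySem.List.dedup cs) :
    (pvDictOf cs).getD (pvKey a) [] = pvPositions cs a := by
  rw [PySem.Dict.getD_eq_get?_getD,
    PySem.Dict.get?_of_mem_items (pvDictOf cs)
      (List.mem_map.2 ⟨a, ha, rfl⟩) (pvKeys_dictOf_nodup cs)]
  rfl

theorem pv_loop_inv (cs : List Char) :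
    cs.foldl pvStepA (PySem.Dict.empty, 0) = (pvDictOf cs, (cs.length : Int)) := by
  induction cs using List.reverseRecOn with
  | nil => rfl
  | append_singleton cs a ih =>
    rw [List.foldl_append, List.foldl_cons, List.foldl_nil, ih]
    have hlen : (((cs ++ [a]).length : Int)) = (cs.length : Int) + 1 := by
      simp
    by_cases hmem : a ∈ PySem.List.dedup cs
    · have hc : (pvDictOf cs).contains (pvKey a) = true := (pvContains_dictOf cs a).2 hmem
      have hdd : PySem.List.dedup (cs ++ [a]) = PySem.List.dedup cs := by
        rw [PySem.List.dedup_eq_ofList, PySem.Set.ofList_append_singleton,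
          ← PySem.List.dedup_eq_ofList]
        exact PySem.Set.add_of_mem hmem
      have h1 : pvStepA (pvDictOf cs, (cs.length : Int)) a
          = ((pvDictOf cs).insert (pvKey a)
              ((pvDictOf cs).getD (pvKey a) [] ++ [(cs.length : Int)]),
             (cs.length : Int) + 1) := by
        simp [pvStepA, hc]
      have hD : (pvDictOf cs).insert (pvKey a)
            ((pvDictOf cs).getD (pvKey a) [] ++ [(cs.length : Int)])
          = pvDictOf (cs ++ [a]) := by
        apply pvDict_eq_of_items
        rw [PySem.Dict.items_insert_of_contains _ _ hc, pvGetD_dictOf cs a hmem]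
        show List.map _ ((PySem.List.dedup cs).map _) = _
        rw [List.map_map]
        simp only [pvDictOf, hdd]
        refine List.map_congr_left ?_
        intro c hcmem
        by_cases hca : c = a
        · subst hca
          simp [Function.comp, pvPositions_append]
        · have hb : (pvKey c == pvKey a) = false := by
            rw [pvKey_beq]; exact beq_eq_false_iff_ne.2 hca
          simp [Function.comp, hb, pvPositions_append, hca]
      rw [h1, hD, hlen]
    · have hc : (pvDictOf cs).contains (pvKey a) = false := by
        rw [← Bool.not_eq_true, pvContains_dictOf]; exact hmem
      have hnm : a ∉ cs := fun h => hmem (by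
        rw [PySem.List.dedup_eq_ofList]; exact (PySem.Set.mem_ofList _ _).2 h)
      have hdd : PySem.List.dedup (cs ++ [a]) = PySem.List.dedup cs ++ [a] := by
        rw [PySem.List.dedup_eq_ofList, PySem.Set.ofList_append_singleton,
          ← PySem.List.dedup_eq_ofList]
        exact PySem.Set.add_of_not_mem hmem
      have h1 : pvStepA (pvDictOf cs, (cs.length : Int)) a
          = ((pvDictOf cs).insert (pvKey a) [(cs.length : Int)],
             (cs.length : Int) + 1) := by
        simp [pvStepA, hc]
      have hD : (pvDictOf cs).insert (pvKey a) [(cs.length : Int)]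
          = pvDictOf (cs ++ [a]) := by
        apply pvDict_eq_of_items
        rw [PySem.Dict.items_insert_of_not_contains _ _ hc]
        show (PySem.List.dedup cs).map _ ++ _ = _
        simp only [pvDictOf, hdd, List.map_append, List.map_cons, List.map_nil]
        congr 1
        · refine List.map_congr_left ?_
          intro c hcmem
          have hca : c ≠ a := fun h => (h ▸ hmem) hcmem
          simp [pvPositions_append, hca]
        · simp [pvPositions_append, pvPositions_nil_of_not_mem hnm]
      rw [h1, hD, hlen]

-- ===== VERDICT (by name: the statement is the Claim_ definition above) =====
theorem map_word_spec : Claim_equal_map_word := by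
  intro word _
  show map_word word = map_word_alt word
  rw [map_word, pv_loop_inv]
  rfl
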